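-- pv_equiv track=rewrite | github.com/paulklemstine/factor | v11_theorem_hunter.py | mat_inv_mod
-- ===== SOURCE A (Python) =====
-- def mat_inv_mod(M, p):
--     """Invert 3x3 matrix mod p using adjugate."""
--     a = [[M[i][j] for j in range(3)] for i in range(3)]
--     det = (a[0][0]*(a[1][1]*a[2][2]-a[1][2]*a[2][1])
--           -a[0][1]*(a[1][0]*a[2][2]-a[1][2]*a[2][0])
--           +a[0][2]*(a[1][0]*a[2][1]-a[1][1]*a[2][0])) % p
--     if det == 0:
--         return None
--     det_inv = pow(det, p-2, p)
--     adj = [[0]*3 for _ in range(3)]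
--     adj[0][0] = (a[1][1]*a[2][2] - a[1][2]*a[2][1]) % p
--     adj[0][1] = (a[0][2]*a[2][1] - a[0][1]*a[2][2]) % p
--     adj[0][2] = (a[0][1]*a[1][2] - a[0][2]*a[1][1]) % p
--     adj[1][0] = (a[1][2]*a[2][0] - a[1][0]*a[2][2]) % p
--     adj[1][1] = (a[0][0]*a[2][2] - a[0][2]*a[2][0]) % p
--     adj[1][2] = (a[0][2]*a[1][0] - a[0][0]*a[1][2]) % p
--     adj[2][0] = (a[1][0]*a[2][1] - a[1][1]*a[2][0]) % p
--     adj[2][1] = (a[0][1]*a[2][0] - a[0][0]*a[2][1]) % p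
--     adj[2][2] = (a[0][0]*a[1][1] - a[0][1]*a[1][0]) % p
--     return tuple(tuple((adj[i][j] * det_inv) % p for j in range(3)) for i in range(3))
-- ===== SOURCE B (Python) =====
-- def mat_inv_mod(M, p):
--     """Invert 3x3 matrix mod p via Cayley-Hamilton: adj = M^2 - tr(M)*M + c1*I."""
--     det = (M[0][0]*(M[1][1]*M[2][2]-M[1][2]*M[2][1])
--           -M[0][1]*(M[1][0]*M[2][2]-M[1][2]*M[2][0])
--           +M[0][2]*(M[1][0]*M[2][1]-M[1][1]*M[2][0])) % p
--     if det == 0: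
--         return None
--     det_inv = pow(det, p-2, p)
--     t = M[0][0] + M[1][1] + M[2][2]
--     c1 = (M[0][0]*M[1][1] - M[0][1]*M[1][0]
--         + M[0][0]*M[2][2] - M[0][2]*M[2][0]
--         + M[1][1]*M[2][2] - M[1][2]*M[2][1])
--     m2 = [[sum(M[i][k]*M[k][j] for k in range(3)) for j in range(3)] for i in range(3)]
--     adj = [[(m2[i][j] - t*M[i][j] + (c1 if i == j else 0)) % p for j in range(3)]
--            for i in range(3)]
--     return tuple(tuple((adj[i][j]*det_inv) % p for j in range(3)) for i in range(3))
-- ===== Notes on version B (the rewrite author's own statement) =====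
-- stated objective: alternative
-- what changed: The nine hand-written cofactor formulas are replaced by the Cayley-Hamilton identity adj(M) = M^2 - tr(M)*M + c1*I (c1 = sum of principal 2x2 minors), computed via a matrix product and an entrywise polynomial combination; det and det_inv = pow(det, p-2, p) are kept verbatim.
-- outside the precondition, e.g. on mat_inv_mod([[2, 0, 0], [0, 1, 0], [0, 0, 1]], -4): A raises ValueError, B raises ValueError
import Mathlib
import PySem

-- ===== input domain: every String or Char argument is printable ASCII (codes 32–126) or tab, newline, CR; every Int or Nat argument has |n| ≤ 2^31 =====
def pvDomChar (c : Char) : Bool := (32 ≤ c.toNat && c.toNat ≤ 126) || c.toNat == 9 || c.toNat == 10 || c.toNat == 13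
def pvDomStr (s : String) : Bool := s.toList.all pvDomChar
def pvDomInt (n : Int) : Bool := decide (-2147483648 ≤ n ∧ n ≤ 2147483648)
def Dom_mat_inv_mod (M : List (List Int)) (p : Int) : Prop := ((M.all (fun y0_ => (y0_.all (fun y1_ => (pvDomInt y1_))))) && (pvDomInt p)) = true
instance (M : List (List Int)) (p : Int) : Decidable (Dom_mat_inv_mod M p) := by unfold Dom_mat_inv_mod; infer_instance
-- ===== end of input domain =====

-- B replaces A's nine hand-written cofactors by the Cayley–Hamilton form adj = M² − tr(M)·M + c1·I (objective: alternative, same cost).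

-- M[i][j] (exact for in-range indices; Pre_ guarantees them)
def pvEntry (M : List (List Int)) (i j : Int) : Int :=
  PySem.List.pyGetD (PySem.List.pyGetD M i []) j 0

-- ===== PORT A =====
def mat_inv_mod (M : List (List Int)) (p : Int) : Option (List (List Int)) :=
  -- a = [[M[i][j] for j in range(3)] for i in range(3)], flattened to its nine entry reads
  let a00 := pvEntry M 0 0; let a01 := pvEntry M 0 1; let a02 := pvEntry M 0 2
  let a10 := pvEntry M 1 0; let a11 := pvEntry M 1 1; let a12 := pvEntry M 1 2
  let a20 := pvEntry M 2 0; let a21 := pvEntry M 2 1; let a22 := pvEntry M 2 2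
  let det := PySem.Int.mod (a00*(a11*a22-a12*a21) - a01*(a10*a22-a12*a20) + a02*(a10*a21-a11*a20)) p
  if det = 0 then none
  else
    -- pow(det, p-2, p); whenever this line is reached under Pre_ we have p ≥ 2, so (p-2).toNat is exact
    let detInv := PySem.Int.powMod det (p-2).toNat p
    let adj00 := PySem.Int.mod (a11*a22 - a12*a21) p
    let adj01 := PySem.Int.mod (a02*a21 - a01*a22) p
    let adj02 := PySem.Int.mod (a01*a12 - a02*a11) p
    let adj10 := PySem.Int.mod (a12*a20 - a10*a22) p
    let adj11 := PySem.Int.mod (a00*a22 - a02*a20) p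
    let adj12 := PySem.Int.mod (a02*a10 - a00*a12) p
    let adj20 := PySem.Int.mod (a10*a21 - a11*a20) p
    let adj21 := PySem.Int.mod (a01*a20 - a00*a21) p
    let adj22 := PySem.Int.mod (a00*a11 - a01*a10) p
    some [[PySem.Int.mod (adj00*detInv) p, PySem.Int.mod (adj01*detInv) p, PySem.Int.mod (adj02*detInv) p],
          [PySem.Int.mod (adj10*detInv) p, PySem.Int.mod (adj11*detInv) p, PySem.Int.mod (adj12*detInv) p],
          [PySem.Int.mod (adj20*detInv) p, PySem.Int.mod (adj21*detInv) p, PySem.Int.mod (adj22*detInv) p]]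

-- ===== PORT B =====
def mat_inv_mod_alt (M : List (List Int)) (p : Int) : Option (List (List Int)) :=
  let det := PySem.Int.mod (pvEntry M 0 0*(pvEntry M 1 1*pvEntry M 2 2-pvEntry M 1 2*pvEntry M 2 1)
          - pvEntry M 0 1*(pvEntry M 1 0*pvEntry M 2 2-pvEntry M 1 2*pvEntry M 2 0)
          + pvEntry M 0 2*(pvEntry M 1 0*pvEntry M 2 1-pvEntry M 1 1*pvEntry M 2 0)) p
  if det = 0 then none
  else
    -- pow(det, p-2, p); whenever this line is reached under Pre_ we have p ≥ 2, so (p-2).toNat is exact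
    let detInv := PySem.Int.powMod det (p-2).toNat p
    let t := pvEntry M 0 0 + pvEntry M 1 1 + pvEntry M 2 2
    let c1 := pvEntry M 0 0*pvEntry M 1 1 - pvEntry M 0 1*pvEntry M 1 0
            + pvEntry M 0 0*pvEntry M 2 2 - pvEntry M 0 2*pvEntry M 2 0
            + pvEntry M 1 1*pvEntry M 2 2 - pvEntry M 1 2*pvEntry M 2 1
    let m2 := (PySem.List.pyRange 0 3 1).map (fun i =>
        (PySem.List.pyRange 0 3 1).map (fun j =>
          ((PySem.List.pyRange 0 3 1).map (fun k => pvEntry M i k * pvEntry M k j)).sum))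
    let adj := (PySem.List.pyRange 0 3 1).map (fun i =>
        (PySem.List.pyRange 0 3 1).map (fun j =>
          PySem.Int.mod (pvEntry m2 i j - t * pvEntry M i j + (if i = j then c1 else 0)) p))
    some ((PySem.List.pyRange 0 3 1).map (fun i =>
        (PySem.List.pyRange 0 3 1).map (fun j =>
          PySem.Int.mod (pvEntry adj i j * detInv) p)))

-- ===== PRECONDITION & SPEC =====
-- Pre_ restricts to the function's natural domain: a matrix with at least 3 rows of 3 entries and a
-- positive modulus p ≥ 1; outside it A raises (IndexError for short input, ZeroDivisionError for p = 0,
-- ValueError for negative p with det not coprime to p) or, for the remaining negative p, returns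
-- negative-modulus artefacts that B (the Python) reproduces identically but are outside the prime-field purpose.
def Pre_mat_inv_mod (M : List (List Int)) (p : Int) : Prop :=
  3 ≤ M.length ∧ (∀ r ∈ M.take 3, 3 ≤ r.length) ∧ 1 ≤ p
instance (M : List (List Int)) (p : Int) : Decidable (Pre_mat_inv_mod M p) := by unfold Pre_mat_inv_mod; infer_instance
def pvWitness_mat_inv_mod : List (List Int) × Int := ([[1,2,3],[0,1,4],[5,6,0]], 7)

def Spec_mat_inv_mod (M : List (List Int)) (p : Int) (out : Option (List (List Int))) : Prop := out = mat_inv_mod_alt M p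
instance (M : List (List Int)) (p : Int) (out : Option (List (List Int))) : Decidable (Spec_mat_inv_mod M p out) := by unfold Spec_mat_inv_mod; infer_instance

-- ===== CLAIM (what is proved, stated in full; the proofs are below) =====
def Claim_equal_mat_inv_mod : Prop := ∀ (M : List (List Int)) (p : Int), Dom_mat_inv_mod M p → Pre_mat_inv_mod M p → Spec_mat_inv_mod M p (mat_inv_mod M p)

-- ===== LEMMAS AND PROOFS =====

theorem pvRange3 : PySem.List.pyRange 0 3 1 = [0, 1, 2] := by decide

-- ===== VERDICT (by name: the statement is the Claim_ definition above) =====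
theorem mat_inv_mod_spec : Claim_equal_mat_inv_mod := by
  intro M p _ hpre
  obtain ⟨hlen, hrows, hp⟩ := hpre
  rcases M with _ | ⟨r0, _ | ⟨r1, _ | ⟨r2, rest⟩⟩⟩ <;> simp at hlen
  have h0 : 3 ≤ r0.length := hrows r0 (by simp)
  have h1 : 3 ≤ r1.length := hrows r1 (by simp)
  have h2 : 3 ≤ r2.length := hrows r2 (by simp)
  rcases r0 with _ | ⟨a, _ | ⟨b, _ | ⟨c, t0⟩⟩⟩ <;> simp at h0
  rcases r1 with _ | ⟨d, _ | ⟨e, _ | ⟨f, t1⟩⟩⟩ <;> simp at h1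
  rcases r2 with _ | ⟨g, _ | ⟨h, _ | ⟨i, t2⟩⟩⟩ <;> simp at h2
  unfold Spec_mat_inv_mod mat_inv_mod mat_inv_mod_alt
  simp only [pvRange3, List.map, pvEntry, PySem.List.pyGetD_ofNat', List.getD, List.getElem?_cons_zero,
    List.getElem?_cons_succ, Option.getD_some, reduceIte, Int.reduceEq]
  split_ifs with hdet
  · rfl
  · simp only [List.sum_cons, List.sum_nil]
    ring_nf
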